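-- pv_equiv track=rewrite | github.com/MizaGBF/MizaBOT | bot.py | fixCase
-- ===== SOURCE A (Python) =====
-- def fixCase(term): # term is a string
--     fixed = ""
--     up = False
--     if term.lower() == "and": # if it's just 'and', we don't don't fix anything and return a lowercase 'and'
--         return "and"
--     for i in range(0, len(term)): # for each character
--         if term[i].isalpha(): # if letter
--             if term[i].isupper(): # is uppercase
--                 if not up: # we haven't encountered an uppercase letter
--                     up = True
--                     fixed += term[i] # save
--                 else: # we have
--                     fixed += term[i].lower() # make it lowercase and save
--             elif term[i].islower(): # is lowercase
--                 if not up: # we haven't encountered an uppercase letter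
--                     fixed += term[i].upper() # make it uppercase and save
--                     up = True
--                 else: # we have
--                     fixed += term[i] # save
--             else: # error case
--                 fixed += term[i] # we just save
--         elif term[i] == "/" or term[i] == ":" or term[i] == "#": # we reset the uppercase detection if we encounter those
--             up = False
--             fixed += term[i]
--         else: # everything else,
--             fixed += term[i] # we save
--     return fixed # return the result
-- ===== SOURCE B (Python) =====
-- def _seg(s):
--     # capitalize the first letter of the segment, lowercase everything after it
--     for i, ch in enumerate(s):
--         if ch.isalpha():
--             return s[:i] + ch.upper() + s[i+1:].lower()
--     return s
--
-- def fixCase(term):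
--     if term.lower() == "and":
--         return "and"
--     out = []
--     start = 0
--     for i, ch in enumerate(term):
--         if ch in "/:#":
--             out.append(_seg(term[start:i]))
--             out.append(ch)
--             start = i + 1
--     out.append(_seg(term[start:]))
--     return "".join(out)
-- ===== Notes on version B (the rewrite author's own statement) =====
-- stated objective: faster
-- what changed: Replaces A's character-by-character state machine (an 'up' flag and per-character string appends over the whole string) with a partition of the string at the reset characters /:# and a per-segment transform that finds the first letter, uppercases it, and lowercases the tail of the segment with slicing and bulk str.lower.
import Mathlib
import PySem

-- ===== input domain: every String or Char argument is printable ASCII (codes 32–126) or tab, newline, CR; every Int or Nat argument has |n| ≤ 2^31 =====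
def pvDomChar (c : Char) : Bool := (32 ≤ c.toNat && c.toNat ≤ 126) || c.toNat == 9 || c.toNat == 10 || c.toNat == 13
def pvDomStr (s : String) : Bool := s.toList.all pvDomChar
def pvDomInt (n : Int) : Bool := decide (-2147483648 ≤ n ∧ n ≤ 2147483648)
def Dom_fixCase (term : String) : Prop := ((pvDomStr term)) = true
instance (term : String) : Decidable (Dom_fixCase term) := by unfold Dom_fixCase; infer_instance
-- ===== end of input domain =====

-- B replaces A's single stateful scan with a partition at /:# plus a per-segment
-- "capitalize first letter, lowercase the rest" transform (objective: alternative).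

-- ===== PORT A =====
-- the for-loop over term, with its 'up' flag, as a structural recursion
def fixCaseGo (up : Bool) : List Char → List Char
  | [] => []
  | c :: rest =>
    if PySem.Chars.isalpha c then
      if PySem.Chars.isupper c then
        if !up then c :: fixCaseGo true rest
        else PySem.Chars.lowerChar c :: fixCaseGo up rest
      else if PySem.Chars.islower c then
        if !up then PySem.Chars.upperChar c :: fixCaseGo true rest
        else c :: fixCaseGo up rest
      else c :: fixCaseGo up rest
    else if (c = '/' || c = ':' || c = '#') then c :: fixCaseGo false rest
    else c :: fixCaseGo up rest

def fixCase (term : String) : String :=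
  if PySem.Str.lower term = "and" then "and"
  else String.ofList (fixCaseGo false term.toList)

-- ===== PORT B =====
-- _seg: scan for the first letter; uppercase it and lowercase the tail of the segment
def segFix : List Char → List Char
  | [] => []
  | c :: rest =>
    if PySem.Chars.isalpha c then PySem.Chars.upperChar c :: PySem.Chars.lower rest
    else c :: segFix rest

-- the main loop: accumulate the current segment, flush it (through segFix) at each /:#
def altGo : List Char → List Char → List Char
  | cur, [] => segFix cur
  | cur, c :: rest =>
    if (c = '/' || c = ':' || c = '#') then segFix cur ++ c :: altGo [] rest
    else altGo (cur ++ [c]) rest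

def fixCase_alt (term : String) : String :=
  if PySem.Str.lower term = "and" then "and"
  else String.ofList (altGo [] term.toList)

-- ===== PRECONDITION & SPEC =====
def Spec_fixCase (term : String) (out : String) : Prop := out = fixCase_alt term
instance (term : String) (out : String) : Decidable (Spec_fixCase term out) := by unfold Spec_fixCase; infer_instance

-- ===== CLAIM (what is proved, stated in full; the proofs are below) =====
def Claim_equal_fixCase : Prop := ∀ (term : String), Dom_fixCase term → Spec_fixCase term (fixCase term)

-- ===== LEMMAS AND PROOFS =====

def noReset (c : Char) : Bool := !(c = '/' || c = ':' || c = '#')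

lemma upper_not_lower {c : Char} (h : PySem.Chars.isupper c = true) :
    PySem.Chars.islower c = false := by
  have e1 : 'A'.val.toNat = 65 := rfl
  have e2 : 'Z'.val.toNat = 90 := rfl
  have e3 : 'a'.val.toNat = 97 := rfl
  have e4 : 'z'.val.toNat = 122 := rfl
  simp only [PySem.Chars.isupper, PySem.Chars.islower, Char.le_def,
    UInt32.le_iff_toNat_le, Bool.and_eq_true, decide_eq_true_eq,
    Bool.and_eq_false_iff, decide_eq_false_iff_not, not_le] at *
  omega

lemma alpha_noReset {c : Char} (h : PySem.Chars.isalpha c = true) :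
    (c = '/' || c = ':' || c = '#') = false := by
  have e1 : 'A'.val.toNat = 65 := rfl
  have e2 : 'Z'.val.toNat = 90 := rfl
  have e3 : 'a'.val.toNat = 97 := rfl
  have e4 : 'z'.val.toNat = 122 := rfl
  have e5 : '/'.val.toNat = 47 := rfl
  have e6 : ':'.val.toNat = 58 := rfl
  have e7 : '#'.val.toNat = 35 := rfl
  have hinj : ∀ a b : Char, a = b ↔ a.val.toNat = b.val.toNat := by
    intro a b
    constructor
    · intro h; rw [h]
    · intro h; exact Char.ext (UInt32.toNat_inj.mp h)
  simp only [PySem.Chars.isalpha, PySem.Chars.isupper, PySem.Chars.islower, Char.le_def,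
    UInt32.le_iff_toNat_le, Bool.or_eq_true, Bool.and_eq_true, decide_eq_true_eq,
    Bool.or_eq_false_iff, decide_eq_false_iff_not, hinj] at *
  omega

lemma lowerChar_of_not_upper {c : Char} (h : PySem.Chars.isupper c = false) :
    PySem.Chars.lowerChar c = c := by
  simp [PySem.Chars.lowerChar, h]

lemma upperChar_of_upper {c : Char} (h : PySem.Chars.isupper c = true) :
    PySem.Chars.upperChar c = c := by
  simp [PySem.Chars.upperChar, upper_not_lower h]

-- the tail of the current piece after fixCaseGo has seen its first letter
lemma fixCaseGo_true (s : List Char) :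
    fixCaseGo true s =
      PySem.Chars.lower (s.takeWhile noReset) ++
        (match s.dropWhile noReset with
         | [] => []
         | d :: t => d :: fixCaseGo false t) := by
  induction s with
  | nil => simp [fixCaseGo, PySem.Chars.lower]
  | cons c rest ih =>
    by_cases ha : PySem.Chars.isalpha c
    · have hr := alpha_noReset ha
      have hnr : noReset c = true := by simp [noReset, hr]
      by_cases hu : PySem.Chars.isupper c
      · simp [fixCaseGo, ha, hu, hr, List.takeWhile_cons, List.dropWhile_cons, hnr,
              PySem.Chars.lower, ih]
      · have hl : PySem.Chars.islower c := by
          have := ha; simp [PySem.Chars.isalpha, hu] at this; exact this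
        simp [fixCaseGo, ha, hu, hl, hr, List.takeWhile_cons, List.dropWhile_cons, hnr,
              PySem.Chars.lower, lowerChar_of_not_upper (by simpa using hu), ih]
    · by_cases hr : (c = '/' || c = ':' || c = '#')
      · have hnr : noReset c = false := by simp [noReset, hr]
        simp [fixCaseGo, ha, hr, List.takeWhile_cons, List.dropWhile_cons, hnr,
              PySem.Chars.lower]
      · have hnr : noReset c = true := by simp [noReset]; simpa using hr
        have hu : PySem.Chars.isupper c = false := by
          by_contra h
          exact ha (by simp [PySem.Chars.isalpha, eq_true_of_ne_false (by simpa using h)])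
        simp [fixCaseGo, ha, hr, List.takeWhile_cons, List.dropWhile_cons, hnr,
              PySem.Chars.lower, lowerChar_of_not_upper hu, ih]

-- one segment of A's scan equals segFix of that segment
lemma fixCaseGo_false (s : List Char) :
    fixCaseGo false s =
      segFix (s.takeWhile noReset) ++
        (match s.dropWhile noReset with
         | [] => []
         | d :: t => d :: fixCaseGo false t) := by
  induction s with
  | nil => simp [fixCaseGo, segFix]
  | cons c rest ih =>
    by_cases ha : PySem.Chars.isalpha c
    · have hr := alpha_noReset ha
      have hnr : noReset c = true := by simp [noReset, hr]
      by_cases hu : PySem.Chars.isupper c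
      · simp [fixCaseGo, ha, hu, hr, List.takeWhile_cons, List.dropWhile_cons, hnr,
              segFix, upperChar_of_upper hu, fixCaseGo_true]
      · have hl : PySem.Chars.islower c := by
          have := ha; simp [PySem.Chars.isalpha, hu] at this; exact this
        simp [fixCaseGo, ha, hu, hl, hr, List.takeWhile_cons, List.dropWhile_cons, hnr,
              segFix, fixCaseGo_true]
    · by_cases hr : (c = '/' || c = ':' || c = '#')
      · have hnr : noReset c = false := by simp [noReset, hr]
        simp [fixCaseGo, ha, hr, List.takeWhile_cons, List.dropWhile_cons, hnr, segFix]
      · have hnr : noReset c = true := by simp [noReset]; simpa using hr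
        simp [fixCaseGo, ha, hr, List.takeWhile_cons, List.dropWhile_cons, hnr, segFix, ih]

-- B's accumulator loop in closed form
lemma altGo_eq (s : List Char) : ∀ cur : List Char,
    altGo cur s =
      segFix (cur ++ s.takeWhile noReset) ++
        (match s.dropWhile noReset with
         | [] => []
         | d :: t => d :: altGo [] t) := by
  induction s with
  | nil => intro cur; simp [altGo]
  | cons c rest ih =>
    intro cur
    by_cases hr : (c = '/' || c = ':' || c = '#')
    · have hnr : noReset c = false := by simp [noReset, hr]
      simp [altGo, hr, List.takeWhile_cons, List.dropWhile_cons, hnr]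
    · have hnr : noReset c = true := by simp [noReset]; simpa using hr
      simp [altGo, hr, List.takeWhile_cons, List.dropWhile_cons, hnr, ih]

lemma go_eq_altGo (s : List Char) : fixCaseGo false s = altGo [] s := by
  have h : ∀ n (s : List Char), s.length ≤ n → fixCaseGo false s = altGo [] s := by
    intro n
    induction n with
    | zero =>
      intro s hs
      have : s = [] := List.eq_nil_of_length_eq_zero (Nat.le_zero.mp hs)
      simp [this, fixCaseGo, altGo, segFix]
    | succ n ih =>
      intro s hs
      rw [fixCaseGo_false, altGo_eq]
      simp only [List.nil_append]
      cases hd : s.dropWhile noReset with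
      | nil => rfl
      | cons d t =>
        have hlen : t.length < s.length := by
          have h1 : (s.dropWhile noReset).length ≤ s.length := List.length_dropWhile_le _ _
          rw [hd] at h1; simp at h1; omega
        simp [ih t (by omega)]
  exact h s.length s le_rfl

-- ===== VERDICT (by name: the statement is the Claim_ definition above) =====
theorem fixCase_spec : Claim_equal_fixCase := by
  intro term _
  unfold Spec_fixCase fixCase fixCase_alt
  rw [go_eq_altGo]
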